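-- pv_equiv track=rewrite | github.com/masaccio/numbers-parser | src/numbers_parser/cell_storage.py | expand_quotes
-- ===== SOURCE A (Python) =====
-- def expand_quotes(value: str) -> str:
--     chars = [*value]
--     index = 0
--     in_string = False
--     formatted_value = ""
--     while index < len(chars):
--         current_char = chars[index]
--         next_char = chars[index + 1] if index < len(chars) - 1 else None
--         if current_char == "'":
--             if next_char is None:
--                 break
--             elif chars[index + 1] == "'":
--                 formatted_value += "'"
--                 index += 2
--             elif in_string:
--                 in_string = False
--                 index += 1
--             else:
--                 in_string = True
--                 index += 1
--         else:
--             formatted_value += current_char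
--             index += 1
--     return formatted_value
-- ===== SOURCE B (Python) =====
-- import re
--
-- def expand_quotes(value: str) -> str:
--     return re.sub(r"''|'", lambda m: "'" if m.group() == "''" else "", value)
-- ===== Notes on version B (the rewrite author's own statement) =====
-- stated objective: faster
-- what changed: Replaced the manual index/while loop with its in_string flag and repeated string concatenation by a single regex-substitution pass whose alternation matches a doubled quote first (kept as one quote) else a lone quote (dropped).
import Mathlib
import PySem

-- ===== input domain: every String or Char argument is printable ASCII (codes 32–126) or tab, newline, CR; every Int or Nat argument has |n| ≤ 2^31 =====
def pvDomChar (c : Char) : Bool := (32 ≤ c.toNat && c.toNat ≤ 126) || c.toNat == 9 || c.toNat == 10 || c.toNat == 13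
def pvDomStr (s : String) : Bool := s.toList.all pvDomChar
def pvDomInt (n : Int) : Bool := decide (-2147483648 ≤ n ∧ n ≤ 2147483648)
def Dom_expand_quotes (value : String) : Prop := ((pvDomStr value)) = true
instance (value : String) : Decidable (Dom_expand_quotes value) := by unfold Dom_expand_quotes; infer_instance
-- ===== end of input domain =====

-- ===== PORT A =====
-- B unescapes doubled single-quotes to one quote and drops lone quote markers via
-- one regex pass instead of A's manual index loop; idiomatic rewrite, same values.
-- Python string accumulation/indexing is ported over List Char (exact for these ops).
-- chars = [*value]; while index < len(chars): … ported as structural recursion on the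
-- remaining suffix (current_char = head, next_char = second element or none).
def expandQuotesLoopA : List Char → Bool → List Char → List Char
  | [], _, acc => acc
  | c :: rest, in_string, acc =>
    if c = '\'' then
      match rest with
      | [] => acc            -- next_char is None: break
      | n :: rest' =>
        if n = '\'' then expandQuotesLoopA rest' in_string (acc ++ ['\''])
        else if in_string then expandQuotesLoopA (n :: rest') false acc
        else expandQuotesLoopA (n :: rest') true acc
    else expandQuotesLoopA rest in_string (acc ++ [c])

def expand_quotes (value : String) : String :=
  String.mk (expandQuotesLoopA value.toList false [])

-- ===== PORT B =====
-- port of re.sub(r"''|'", …): left-to-right non-overlapping scan, alternation tries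
-- the doubled quote first (→ one quote), else the lone quote (→ dropped).
def expandQuotesSubB : List Char → List Char
  | '\'' :: '\'' :: rest => '\'' :: expandQuotesSubB rest
  | '\'' :: rest => expandQuotesSubB rest
  | c :: rest => c :: expandQuotesSubB rest
  | [] => []

def expand_quotes_alt (value : String) : String :=
  String.mk (expandQuotesSubB value.toList)

-- ===== PRECONDITION & SPEC =====
def Spec_expand_quotes (value : String) (out : String) : Prop := out = expand_quotes_alt value
instance (value : String) (out : String) : Decidable (Spec_expand_quotes value out) := by unfold Spec_expand_quotes; infer_instance

-- ===== CLAIM (what is proved, stated in full; the proofs are below) =====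
def Claim_equal_expand_quotes : Prop := ∀ (value : String), Dom_expand_quotes value → Spec_expand_quotes value (expand_quotes value)

-- ===== LEMMAS AND PROOFS =====
theorem expandQuotesSubB_cons_ne (c : Char) (rest : List Char) (hn : ¬ c = '\'') :
    expandQuotesSubB (c :: rest) = c :: expandQuotesSubB rest := by
  rw [expandQuotesSubB.eq_def]
  cases rest with
  | nil => simp [hn]
  | cons d r => by_cases hd : d = '\'' <;> simp [hn, hd]

theorem expandQuotesLoopA_eq (l : List Char) : ∀ (ins : Bool) (acc : List Char),
    expandQuotesLoopA l ins acc = acc ++ expandQuotesSubB l := by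
  induction l using expandQuotesSubB.induct with
  | case1 rest ih => intro ins acc; simp [expandQuotesLoopA, expandQuotesSubB, ih]
  | case2 rest h ih =>
    intro ins acc
    cases rest with
    | nil => simp [expandQuotesLoopA, expandQuotesSubB]
    | cons n rest' =>
      have hn : ¬ n = '\'' := fun e => h rest' (by rw [e])
      cases ins <;> simp [expandQuotesLoopA, expandQuotesSubB, ih, hn]
  | case3 c rest hc hc2 ih =>
    intro ins acc
    have hn : ¬ c = '\'' := hc2
    rw [expandQuotesLoopA.eq_def, expandQuotesSubB_cons_ne c rest hn]
    simp [hn, ih]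
  | case4 => intro ins acc; simp [expandQuotesLoopA, expandQuotesSubB]

-- ===== VERDICT (by name: the statement is the Claim_ definition above) =====
theorem expand_quotes_spec : Claim_equal_expand_quotes := by
  intro value _
  unfold Spec_expand_quotes expand_quotes expand_quotes_alt
  rw [expandQuotesLoopA_eq]
  simp
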